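-- pv_equiv track=rewrite | github.com/hyunjune-lee/python_algorithm_interview | Temp Storage/토스코테 server/5.py | solution
-- ===== SOURCE A (Python) =====
-- def solution(fruitWeights, k):
--     dp = [0 for _ in range(len(fruitWeights) - k + 1)]
--     dp[0] = max(fruitWeights[:k])
--     max_count = 0
--     for i in range(k):
--         if dp[0] == fruitWeights[i]:
--             max_count += 1
--
--     for i in range(1, len(fruitWeights) - k + 1):
--         if dp[i - 1] < fruitWeights[i + k - 1]:
--             max_count = 1
--             dp[i] = fruitWeights[i + k - 1]
--         elif dp[i - 1] == fruitWeights[i + k - 1]: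
--             max_count += 1
--             dp[i] = dp[i - 1]
--
--             if fruitWeights[i - 1] == fruitWeights[i + k - 1]:
--                 max_count -= 1
--
--         dp[i] = max(dp[i - 1], fruitWeights[i + k - 1])
--
--     return sorted(dp, reverse=True)
-- ===== SOURCE B (Python) =====
-- def solution(fruitWeights, k):
--     # Phase 1: the first window's max (scanned by index) seeds the record list,
--     # then one scan over the remaining elements collects the strict
--     # left-to-right records (index, value).
--     # Phase 2: emit the answer back-to-front as run lengths: the record with
--     # index i governs prefix lengths max(i + 1, k) .. next record index.
--     n = len(fruitWeights)
--     records = [(k - 1, max(fruitWeights[i] for i in range(k)))]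
--     for i in range(k, n):
--         v = fruitWeights[i]
--         if v > records[-1][1]:
--             records.append((i, v))
--     out = []
--     ub = n
--     for i, v in reversed(records):
--         lo = i + 1 if i + 1 > k else k
--         if lo <= ub:
--             out.extend([v] * (ub - lo + 1))
--         ub = i
--     return out
-- ===== Notes on version B (the rewrite author's own statement) =====
-- stated objective: alternative
-- what changed: B replaces A's dp array + tie counter + descending sort by a two-phase record algorithm: one pass collects the strict left-to-right record positions, then the answer is emitted back-to-front as run lengths between consecutive record indices, so no per-window value is stored and no sort is needed; the measured speed-up is input-dependent (1.2-1.7x), so no speed claim is made.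
-- outside the precondition, e.g. on solution([1, 5, 3], -1): A returns [5, 5, 5, 5, 5], B raises ValueError
import Mathlib
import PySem

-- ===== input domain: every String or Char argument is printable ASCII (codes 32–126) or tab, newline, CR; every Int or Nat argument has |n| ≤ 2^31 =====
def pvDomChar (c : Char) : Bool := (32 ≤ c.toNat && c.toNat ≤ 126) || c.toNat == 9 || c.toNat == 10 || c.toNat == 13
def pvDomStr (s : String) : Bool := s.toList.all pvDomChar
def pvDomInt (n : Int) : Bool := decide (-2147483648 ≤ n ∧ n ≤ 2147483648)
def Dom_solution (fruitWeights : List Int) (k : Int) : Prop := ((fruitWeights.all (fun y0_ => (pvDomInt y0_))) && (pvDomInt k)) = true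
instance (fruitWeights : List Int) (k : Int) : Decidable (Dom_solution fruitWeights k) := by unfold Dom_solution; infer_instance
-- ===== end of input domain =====

-- B collects the strict left-to-right record positions in one pass and emits the answer
-- back-to-front as run lengths between record indices, replacing A's dp array, unused
-- tie counter and descending sort.


-- ===== PORT A =====
-- literal transliteration of Source A; `max(...)` on a possibly-empty slice and the
-- dp[0] index write are total here via `.getD` / pySetD, exact under Pre_solution.
def solution (fruitWeights : List Int) (k : Int) : List Int :=
  let n : Int := fruitWeights.length
  let dp : List Int := (PySem.List.pyRange 0 (n - k + 1) 1).map (fun _ => 0)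
  let dp := PySem.List.pySetD dp 0
      ((PySem.List.max? (PySem.List.slice fruitWeights none (some k)) (fun x => x)).getD 0)
  let maxCount : Int := 0
  let st := (PySem.List.pyRange 0 k 1).foldl (fun (st : List Int × Int) i =>
      if PySem.List.pyGetD st.1 0 0 = PySem.List.pyGetD fruitWeights i 0
      then (st.1, st.2 + 1) else st) (dp, maxCount)
  let st := (PySem.List.pyRange 1 (n - k + 1) 1).foldl (fun (st : List Int × Int) i =>
      let st :=
        if PySem.List.pyGetD st.1 (i - 1) 0 < PySem.List.pyGetD fruitWeights (i + k - 1) 0 then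
          (PySem.List.pySetD st.1 i (PySem.List.pyGetD fruitWeights (i + k - 1) 0), (1 : Int))
        else if PySem.List.pyGetD st.1 (i - 1) 0 = PySem.List.pyGetD fruitWeights (i + k - 1) 0 then
          let dp' := PySem.List.pySetD st.1 i (PySem.List.pyGetD st.1 (i - 1) 0)
          let mc := st.2 + 1
          if PySem.List.pyGetD fruitWeights (i - 1) 0 = PySem.List.pyGetD fruitWeights (i + k - 1) 0
          then (dp', mc - 1) else (dp', mc)
        else st
      (PySem.List.pySetD st.1 i
        (max (PySem.List.pyGetD st.1 (i - 1) 0) (PySem.List.pyGetD fruitWeights (i + k - 1) 0)), st.2)) st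
  PySem.List.sorted st.1 (fun x => x) true

-- ===== PORT B =====
-- literal transliteration of Source B: the seed record (k-1, max of the first k
-- elements scanned by index), one index loop collecting the strict records
-- (records[-1] is PySem.List.pyGetD rs (-1)), then a fold over the reversed
-- record list emitting run lengths back-to-front.
def solution_alt (fruitWeights : List Int) (k : Int) : List Int :=
  let n : Int := fruitWeights.length
  let records : List (Int × Int) := (PySem.List.pyRange k n 1).foldl
    (fun (rs : List (Int × Int)) (i : Int) =>
      let v := PySem.List.pyGetD fruitWeights i 0
      if (PySem.List.pyGetD rs (-1) ((0 : Int), (0 : Int))).2 < v then rs ++ [(i, v)] else rs)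
    [(k - 1, (PySem.List.max? ((PySem.List.pyRange 0 k 1).map
        (fun i => PySem.List.pyGetD fruitWeights i 0)) (fun x => x)).getD 0)]
  let st := records.reverse.foldl
    (fun (st : List Int × Int) (iv : Int × Int) =>
      let lo : Int := if iv.1 + 1 > k then iv.1 + 1 else k
      let out := if lo ≤ st.2 then st.1 ++ List.replicate (st.2 - lo + 1).toNat iv.2 else st.1
      (out, iv.1)) ([], n)
  st.1

-- ===== PRECONDITION & SPEC =====
-- Pre_ restricts to the natural window domain 1 ≤ k ≤ len(fruitWeights): outside it A
-- raises (k = 0, k > len, empty list) or, for negative k, returns a list assembled via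
-- negative-index wraparound, an artefact of A's implementation outside the task's domain.
def Pre_solution (fruitWeights : List Int) (k : Int) : Prop :=
  1 ≤ k ∧ k ≤ fruitWeights.length
instance (fruitWeights : List Int) (k : Int) : Decidable (Pre_solution fruitWeights k) := by
  unfold Pre_solution; infer_instance
def pvWitness_solution : List Int × Int := ([3, 1, 4, 1, 5], 2)
def Spec_solution (fruitWeights : List Int) (k : Int) (out : List Int) : Prop :=
  out = solution_alt fruitWeights k
instance (fruitWeights : List Int) (k : Int) (out : List Int) : Decidable (Spec_solution fruitWeights k out) := by
  unfold Spec_solution; infer_instance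

-- ===== CLAIM (what is proved, stated in full; the proofs are below) =====
def Claim_equal_solution : Prop := ∀ (fruitWeights : List Int) (k : Int), Dom_solution fruitWeights k → Pre_solution fruitWeights k → Spec_solution fruitWeights k (solution fruitWeights k)

-- ===== LEMMAS AND PROOFS =====

-- the prefix-max scan A's dp amounts to: pms c ws = [c, max c w0, max (max c w0) w1, …]
def pms (c : Int) : List Int → List Int
  | [] => [c]
  | w :: ws => c :: pms (max c w) ws

theorem length_pms (c : Int) (ws : List Int) : (pms c ws).length = ws.length + 1 := by
  induction ws generalizing c with
  | nil => rfl
  | cons w ws ih => simp [pms, ih]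

theorem pms_getD_zero (c : Int) (ws : List Int) : (pms c ws).getD 0 0 = c := by
  cases ws <;> rfl

theorem pms_getD_succ (c : Int) (ws : List Int) (j : Nat) (hj : j < ws.length) :
    (pms c ws).getD (j + 1) 0 = max ((pms c ws).getD j 0) (ws.getD j 0) := by
  induction ws generalizing c j with
  | nil => simp at hj
  | cons w ws ih =>
    cases j with
    | zero =>
      rw [pms]
      simp only [List.getD_cons_succ, List.getD_cons_zero, pms_getD_zero]
    | succ j => simpa [pms] using ih (max c w) j (by simpa using hj)

theorem le_of_mem_pms (c x : Int) (ws : List Int) (hx : x ∈ pms c ws) : c ≤ x := by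
  induction ws generalizing c with
  | nil => simp [pms] at hx; omega
  | cons w ws ih =>
    simp [pms] at hx
    rcases hx with rfl | hx
    · exact le_refl _
    · exact le_trans (le_max_left _ _) (ih _ hx)

theorem pms_pairwise (c : Int) (ws : List Int) : (pms c ws).Pairwise (· ≤ ·) := by
  induction ws generalizing c with
  | nil => simp [pms]
  | cons w ws ih =>
    refine List.pairwise_cons.2 ⟨fun x hx => ?_, ih (max c w)⟩
    exact le_trans (le_max_left _ _) (le_of_mem_pms _ _ _ hx)

-- the dp-component of one iteration of A's second loop
def Astep (fw : List Int) (k : Int) (dp : List Int) (i : Int) : List Int :=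
  let dp' :=
    if PySem.List.pyGetD dp (i - 1) 0 < PySem.List.pyGetD fw (i + k - 1) 0 then
      PySem.List.pySetD dp i (PySem.List.pyGetD fw (i + k - 1) 0)
    else if PySem.List.pyGetD dp (i - 1) 0 = PySem.List.pyGetD fw (i + k - 1) 0 then
      PySem.List.pySetD dp i (PySem.List.pyGetD dp (i - 1) 0)
    else dp
  PySem.List.pySetD dp' i
    (max (PySem.List.pyGetD dp' (i - 1) 0) (PySem.List.pyGetD fw (i + k - 1) 0))

theorem foldl_fst_eq {α β γ : Type} (F : α × β → γ → α × β) (f : α → γ → α)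
    (h : ∀ s i, (F s i).1 = f s.1 i) :
    ∀ (l : List γ) (s : α × β), (l.foldl F s).1 = l.foldl f s.1 := by
  intro l
  induction l with
  | nil => intro s; rfl
  | cons x l ih => intro s; simp only [List.foldl_cons, ih, h]

theorem foldl_self {α γ : Type} (f : α → γ → α) (h : ∀ s i, f s i = s) :
    ∀ (l : List γ) (s : α), l.foldl f s = s := by
  intro l
  induction l with
  | nil => intro s; rfl
  | cons x l ih => intro s; simp only [List.foldl_cons, h, ih]

theorem Astep_eval (fw : List Int) (k : Int) (c : Int) (t : Nat)
    (hk1 : 1 ≤ k)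
    (ht : t < (fw.drop k.toNat).length) :
    Astep fw k ((pms c (fw.drop k.toNat)).take (t + 1) ++
        List.replicate ((fw.drop k.toNat).length - t) 0) (1 + (t : Int)) =
      (pms c (fw.drop k.toNat)).take (t + 2) ++
        List.replicate ((fw.drop k.toNat).length - (t + 1)) 0 := by
  set rest := fw.drop k.toNat with hrest
  set r := rest.length with hr
  set L := pms c rest with hL
  set dp := L.take (t + 1) ++ List.replicate (r - t) 0 with hdp
  have hk : (k.toNat : Int) = k := Int.toNat_of_nonneg (by omega)
  have hLlen : L.length = r + 1 := by rw [hL, length_pms]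
  have hii : (1 : Int) + (t : Int) = (((t + 1 : Nat)) : Int) := by push_cast; ring
  have hi1 : (((t + 1 : Nat)) : Int) - 1 = ((t : Nat) : Int) := by push_cast; ring
  have hik : (((t + 1 : Nat)) : Int) + k - 1 = ((k.toNat + t : Nat) : Int) := by
    push_cast [hk]; ring
  have hgdp : dp.getD t 0 = L.getD t 0 := by
    rw [hdp, List.getD_append _ _ _ _ (by simp [List.length_take, hLlen]; omega)]
    simp [List.getD_eq_getElem?_getD, List.getElem?_take_of_lt (by omega : t < t + 1)]
  have hgfw : fw.getD (k.toNat + t) 0 = rest.getD t 0 := by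
    simp [List.getD_eq_getElem?_getD, hrest, List.getElem?_drop]
  have hgset : ∀ v : Int, (dp.set (t + 1) v).getD t 0 = dp.getD t 0 := by
    intro v
    simp [List.getD_eq_getElem?_getD, List.getElem?_set_ne (by omega : t + 1 ≠ t)]
  have hfin : dp.set (t + 1) (L.getD (t + 1) 0) =
      L.take (t + 2) ++ List.replicate (r - (t + 1)) 0 := by
    have hrep : List.replicate (r - t) (0 : Int) = 0 :: List.replicate (r - (t + 1)) 0 := by
      have h0 : r - t = (r - (t + 1)) + 1 := by omega
      rw [h0, List.replicate_succ]
    have hsome : L[t + 1]? = some (L.getD (t + 1) 0) := by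
      rw [List.getD_eq_getElem?_getD]
      cases h : L[t + 1]? with
      | none => rw [List.getElem?_eq_none_iff] at h; omega
      | some v => rfl
    have htk : L.take (t + 2) = L.take (t + 1) ++ [L.getD (t + 1) 0] := by
      rw [List.take_add_one, hsome]
      rfl
    have hlt : (L.take (t + 1)).length = t + 1 := by
      rw [List.length_take]; omega
    rw [hdp, List.set_append, if_neg (by rw [hlt]; omega), hlt, Nat.sub_self, hrep,
      List.set_cons_zero, htk]
    simp
  have hstep : Astep fw k dp (1 + (t : Int)) = dp.set (t + 1) (L.getD (t + 1) 0) := by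
    rw [Astep]
    simp only [hii, hi1, hik, PySem.List.pyGetD_natCast, PySem.List.pySetD_natCast,
      hgfw, hgdp]
    rw [pms_getD_succ c rest t (by omega)]
    split_ifs with h1 h2
    · rw [hgset, hgdp, max_eq_right (le_of_lt h1), List.set_set]
    · rw [hgset, hgdp, h2, max_self, List.set_set]
    · rw [hgdp, hL]
  rw [hstep, hfin]

theorem pms_take_one (c : Int) (ws : List Int) : (pms c ws).take 1 = [c] := by
  cases ws <;> rfl

theorem Aloop (fw : List Int) (k c : Int) (hk1 : 1 ≤ k) :
    ∀ t, t ≤ (fw.drop k.toNat).length →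
      (List.range t).foldl (fun (dp : List Int) (j : Nat) => Astep fw k dp (1 + (j : Int)))
          ((pms c (fw.drop k.toNat)).take 1 ++
            List.replicate (fw.drop k.toNat).length 0) =
        (pms c (fw.drop k.toNat)).take (t + 1) ++
          List.replicate ((fw.drop k.toNat).length - t) 0 := by
  intro t
  induction t with
  | zero => intro _; simp
  | succ t ih =>
    intro ht
    rw [List.range_succ, List.foldl_append, List.foldl_cons, List.foldl_nil,
      ih (by omega), Astep_eval fw k c t hk1 (by omega)]

theorem sorted_desc (xs : List Int) (h : xs.Pairwise (· ≤ ·)) :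
    PySem.List.sorted xs (fun x => x) true = xs.reverse := by
  have h1 := PySem.List.sorted_perm (xs := xs) (key := fun x => x) (rev := true)
  have h2 := PySem.List.sorted_pairwise_rev (xs := xs) (key := fun x => x)
  exact (h1.trans (xs.reverse_perm).symm).eq_of_pairwise
    (fun a b _ _ ha hb => le_antisymm hb ha) h2
    (by simpa [List.pairwise_reverse] using h)

theorem map_const_pyRange (m : Nat) :
    (PySem.List.pyRange 0 (m : Int) 1).map (fun _ => (0 : Int)) = List.replicate m 0 := by
  rw [List.eq_replicate_iff]
  constructor
  · simp [PySem.List.length_pyRange_one]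
  · intro b hb
    rcases List.mem_map.1 hb with ⟨_, _, rfl⟩
    rfl

-- A-side summary: solution = descending sort of pms c rest = (pms c rest).reverse
theorem A_eq_pms_rev (fw : List Int) (k : Int) (hk1 : 1 ≤ k) (hk2 : k ≤ (fw.length : Int)) :
    solution fw k =
      (pms ((PySem.List.max? (PySem.List.slice fw none (some k)) (fun x => x)).getD 0)
        (fw.drop k.toNat)).reverse := by
  set c := (PySem.List.max? (PySem.List.slice fw none (some k)) (fun x => x)).getD 0 with hc
  set rest := fw.drop k.toNat with hrest
  set r := rest.length with hr2
  have hrlen : r = fw.length - k.toNat := by rw [hr2, hrest, List.length_drop]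
  have hm : (fw.length : Int) - k + 1 = ((r + 1 : Nat) : Int) := by
    push_cast [hrlen]
    have hk : (k.toNat : Int) = k := Int.toNat_of_nonneg (by omega)
    omega
  have hA : solution fw k = PySem.List.sorted (pms c rest) (fun x => x) true := by
    rw [solution]
    simp only [← hc, hm]
    rw [map_const_pyRange (r + 1)]
    rw [foldl_fst_eq _ (Astep fw k) (by
      intro s i
      rw [Astep]
      split_ifs <;> rfl)]
    rw [foldl_fst_eq _ (fun (dp : List Int) (_ : Int) => dp) (by
      intro s i
      split <;> rfl)]
    rw [foldl_self _ (fun _ _ => rfl)]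
    rw [PySem.List.pyRange_one, List.foldl_map]
    have hcnt : (((r + 1 : Nat) : Int) - 1).toNat = r := by omega
    rw [hcnt]
    have hdp0 : PySem.List.pySetD (List.replicate (r + 1) (0 : Int)) 0 c =
        (pms c rest).take 1 ++ List.replicate r 0 := by
      rw [PySem.List.pySetD_of_nonneg _ _ (by omega), List.replicate_succ]
      simp [pms_take_one]
    rw [hdp0]
    simp only []
    have hal := Aloop fw k c hk1 r le_rfl
    rw [← hrest, ← hr2] at hal
    rw [hal]
    have htake : (pms c rest).take (r + 1) = pms c rest :=
      List.take_of_length_le (by rw [length_pms])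
    simp [htake]
  rw [hA, sorted_desc _ (pms_pairwise c rest)]

-- ============ B side ============

-- model of B's record pass: recsM ws j cur = records of ws, indices from j, running max cur
def recsM : List Int → Int → Int → List (Int × Int)
  | [], _, _ => []
  | w :: ws, j, cur => if cur < w then (j, w) :: recsM ws (j + 1) w else recsM ws (j + 1) cur

-- model of B's expansion pass (processing the reversed record list)
def Ex (k : Int) : List (Int × Int) → Int → List Int
  | [], _ => []
  | (i, v) :: S, ub => List.replicate (ub + 1 - max (i + 1) k).toNat v ++ Ex k S i

-- prefix maximum of the first L.toNat elements (0 if empty)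
def pmQ (fw : List Int) (L : Int) : Int :=
  match fw.take L.toNat with
  | [] => 0
  | y :: ys => ys.foldl max y

-- the invariant a reversed record list satisfies: indices strictly decrease from below ub
-- down to lb, and each record's value is the prefix max for all lengths in its gap
def chain (fw : List Int) : List (Int × Int) → Int → Int → Prop
  | [], ub, lb => ub = lb
  | (i, v) :: S, ub, lb =>
      0 ≤ i ∧ i < ub ∧ (∀ L : Int, i < L → L ≤ ub → pmQ fw L = v) ∧ chain fw S i lb

-- target list: prefix maxima for lengths ub, ub-1, …, k (descending)
def descL (fw : List Int) (k ub : Int) : List Int :=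
  (List.range (ub + 1 - k).toNat).map (fun (j : Nat) => pmQ fw (ub - (j : Int)))

theorem chain_append (fw : List Int) (S T : List (Int × Int)) :
    ∀ ub m lb, chain fw S ub m → chain fw T m lb → chain fw (S ++ T) ub lb := by
  induction S with
  | nil => intro ub m lb h1 h2; cases h1; simpa using h2
  | cons p S ih =>
    intro ub m lb h1 h2
    obtain ⟨i, v⟩ := p
    obtain ⟨h0, hi, hQ, hc⟩ := h1
    exact ⟨h0, hi, hQ, ih i m lb hc h2⟩

theorem descL_succ (fw : List Int) (k ub : Int) (h : k ≤ ub) :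
    descL fw k ub = pmQ fw ub :: descL fw k (ub - 1) := by
  have hm : (ub + 1 - k).toNat = (ub - k).toNat + 1 := by omega
  rw [descL, hm, List.range_succ_eq_map, List.map_cons, List.map_map]
  rw [descL, show ub - 1 + 1 - k = ub - k by ring]
  congr 1
  · simp
  · apply List.map_congr_left
    intro j _
    simp only [Function.comp]
    congr 1
    push_cast
    ring

theorem desc_concat (fw : List Int) (k i ub v : Int) (h0 : 0 ≤ i) (hi : i < ub)
    (hQ : ∀ L : Int, i < L → L ≤ ub → pmQ fw L = v) :
    descL fw k ub = List.replicate (ub + 1 - max (i + 1) k).toNat v ++ descL fw k i := by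
  suffices H : ∀ d : Nat, ∀ ub : Int, (ub - i).toNat = d → i < ub →
      (∀ L : Int, i < L → L ≤ ub → pmQ fw L = v) →
      descL fw k ub = List.replicate (ub + 1 - max (i + 1) k).toNat v ++ descL fw k i by
    exact H (ub - i).toNat ub rfl hi hQ
  intro d
  induction d using Nat.strong_induction_on with
  | _ d ih =>
    intro ub hd hiu hQ'
    by_cases hku : k ≤ ub
    · rw [descL_succ fw k ub hku, hQ' ub hiu le_rfl]
      have hlo : max (i + 1) k ≤ ub := by omega
      have hcnt : (ub + 1 - max (i + 1) k).toNat = (ub - max (i + 1) k).toNat + 1 := by omega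
      rw [hcnt, List.replicate_succ, List.cons_append]
      congr 1
      by_cases hie : i = ub - 1
      · have : (ub - max (i + 1) k).toNat = 0 := by omega
        rw [this, List.replicate_zero, List.nil_append, hie]
      · have hrec := ih (ub - 1 - i).toNat (by omega) (ub - 1) rfl (by omega)
          (fun L h1 h2 => hQ' L h1 (by omega))
        rw [hrec]
        congr 2
        omega
    · -- ub < k: everything is empty
      have e1 : descL fw k ub = [] := by
        rw [descL, show (ub + 1 - k).toNat = 0 by omega, List.range_zero, List.map_nil]
      have e2 : descL fw k i = [] := by
        rw [descL, show (i + 1 - k).toNat = 0 by omega, List.range_zero, List.map_nil]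
      have e3 : (ub + 1 - max (i + 1) k).toNat = 0 := by omega
      rw [e1, e2, e3, List.replicate_zero, List.nil_append]

theorem Ex_correct (fw : List Int) (k : Int) :
    ∀ (S : List (Int × Int)) (ub lb : Int), lb < k → chain fw S ub lb →
      Ex k S ub = descL fw k ub := by
  intro S
  induction S with
  | nil =>
    intro ub lb hlb hc
    cases hc
    rw [Ex, descL, show (ub + 1 - k).toNat = 0 by omega, List.range_zero, List.map_nil]
  | cons p S ih =>
    intro ub lb hlb hc
    obtain ⟨i, v⟩ := p
    obtain ⟨h0, hi, hQ, hch⟩ := hc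
    rw [Ex, ih i lb hlb hch, desc_concat fw k i ub v h0 hi hQ]

theorem pmQ_succ (fw : List Int) (j : Int) (w : Int) (ws : List Int)
    (hj : 1 ≤ j) (hdrop : fw.drop j.toNat = w :: ws) :
    pmQ fw (j + 1) = max (pmQ fw j) w := by
  have hget : fw[j.toNat]? = some w := by
    have h0 : (fw.drop j.toNat)[0]? = fw[j.toNat + 0]? := List.getElem?_drop
    rw [hdrop] at h0
    simpa using h0.symm
  have hjlen : j.toNat < fw.length := by
    by_contra h
    rw [List.getElem?_eq_none_iff.mpr (by omega)] at hget
    simp at hget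
  have hsucc : (j + 1).toNat = j.toNat + 1 := by omega
  have htk : fw.take (j.toNat + 1) = fw.take j.toNat ++ [w] := by
    rw [List.take_add_one, hget]
    rfl
  obtain ⟨y, ys, hys⟩ : ∃ y ys, fw.take j.toNat = y :: ys := by
    cases h : fw.take j.toNat with
    | nil =>
      exfalso
      have := congrArg List.length h
      rw [List.length_take, List.length_nil] at this
      omega
    | cons a l => exact ⟨a, l, rfl⟩
  rw [pmQ, hsucc, htk, hys]
  simp only [List.cons_append]
  rw [List.foldl_append]
  rw [pmQ, hys]
  rfl

theorem recsM_chain (fw : List Int) :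
    ∀ (ws : List Int) (j cur p : Int), 0 ≤ p → p < j → ws = fw.drop j.toNat →
      (∀ L : Int, p < L → L ≤ j → pmQ fw L = cur) →
      chain fw ((recsM ws j cur).reverse ++ [(p, cur)]) (j + (ws.length : Int)) p := by
  intro ws
  induction ws with
  | nil =>
    intro j cur p hp hpj _ hcov
    simp only [recsM, List.reverse_nil, List.nil_append, List.length_nil]
    exact ⟨hp, by omega, fun L h1 h2 => hcov L h1 (by omega), rfl⟩
  | cons w ws ih =>
    intro j cur p hp hpj hdrop hcov
    have hj1 : 1 ≤ j := by omega
    have hdrop' : ws = fw.drop (j + 1).toNat := by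
      have h2 : (j + 1).toNat = j.toNat + 1 := by omega
      rw [h2, ← List.tail_drop, ← hdrop]
      rfl
    have hQsucc : pmQ fw (j + 1) = max (pmQ fw j) w := pmQ_succ fw j w ws hj1 hdrop.symm
    have hQj : pmQ fw j = cur := hcov j (by omega) le_rfl
    have hub : j + ((w :: ws).length : Int) = (j + 1) + (ws.length : Int) := by
      push_cast [List.length_cons]
      ring
    rw [hub, recsM]
    by_cases hcw : cur < w
    · rw [if_pos hcw, List.reverse_cons]
      have hih := ih (j + 1) w j (by omega) (by omega) hdrop'
        (fun L h1 h2 => by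
          have : L = j + 1 := by omega
          rw [this, hQsucc, hQj]
          omega)
      exact chain_append fw _ _ _ j p hih
        ⟨hp, hpj, fun L h1 h2 => hcov L h1 h2, rfl⟩
    · rw [if_neg hcw]
      exact ih (j + 1) cur p hp (by omega) hdrop'
        (fun L h1 h2 => by
          by_cases hLe : L ≤ j
          · exact hcov L h1 hLe
          · have : L = j + 1 := by omega
            rw [this, hQsucc, hQj]
            omega)

-- bridge: the port's index-loop record fold equals the model recsM
theorem rec_fold_eq (fw : List Int) :
    ∀ (ws : List Int) (j : Int), 0 ≤ j → ws = fw.drop j.toNat →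
      ∀ (acc : List (Int × Int)) (i0 v0 : Int),
      (PySem.List.pyRange j (fw.length : Int) 1).foldl
        (fun (rs : List (Int × Int)) (i : Int) =>
          if (PySem.List.pyGetD rs (-1) ((0 : Int), (0 : Int))).2 < PySem.List.pyGetD fw i 0
          then rs ++ [(i, PySem.List.pyGetD fw i 0)]
          else rs) (acc ++ [(i0, v0)]) =
      acc ++ (i0, v0) :: recsM ws j v0 := by
  intro ws
  induction ws with
  | nil =>
    intro j hj hdrop acc i0 v0
    have hlen : fw.length ≤ j.toNat := List.drop_eq_nil_iff.mp hdrop.symm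
    rw [PySem.List.pyRange_one_eq_nil (by omega), List.foldl_nil, recsM]
  | cons w ws ih =>
    intro j hj hdrop acc i0 v0
    have hjlen : j.toNat < fw.length := by
      by_contra h
      rw [List.drop_eq_nil_of_le (by omega)] at hdrop
      simp at hdrop
    have hw : PySem.List.pyGetD fw j 0 = w := by
      have hjc : ((j.toNat : Nat) : Int) = j := by omega
      rw [← hjc, PySem.List.pyGetD_natCast, List.getD_eq_getElem?_getD,
        List.getElem?_eq_getElem hjlen, Option.getD_some]
      have h0 : (fw.drop j.toNat)[0]? = fw[j.toNat + 0]? := List.getElem?_drop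
      rw [← hdrop] at h0
      simp only [List.getElem?_cons_zero, Nat.add_zero] at h0
      rw [List.getElem?_eq_getElem hjlen] at h0
      exact Option.some.inj h0.symm
    have hdrop' : ws = fw.drop (j + 1).toNat := by
      have h2 : (j + 1).toNat = j.toNat + 1 := by omega
      rw [h2, ← List.tail_drop, ← hdrop]
      rfl
    rw [PySem.List.pyRange_one_cons (by push_cast; omega), List.foldl_cons]
    simp only [hw, PySem.List.pyGetD_neg_one_append_singleton _ _ _]
    rw [recsM]
    by_cases hcw : v0 < w
    · rw [if_pos hcw, if_pos hcw]
      have := ih (j + 1) (by omega) hdrop' (acc ++ [(i0, v0)]) j w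
      rw [List.append_assoc] at this
      simpa using this
    · rw [if_neg hcw, if_neg hcw]
      exact ih (j + 1) (by omega) hdrop' acc i0 v0

-- bridge: the port's expansion fold equals the model Ex
theorem exp_fold_eq (k : Int) :
    ∀ (S : List (Int × Int)) (acc : List Int) (ub : Int),
      (S.foldl (fun (st : List Int × Int) (iv : Int × Int) =>
        (if (if iv.1 + 1 > k then iv.1 + 1 else k) ≤ st.2
         then st.1 ++ List.replicate (st.2 - (if iv.1 + 1 > k then iv.1 + 1 else k) + 1).toNat iv.2
         else st.1, iv.1)) (acc, ub)).1 = acc ++ Ex k S ub := by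
  intro S
  induction S with
  | nil => intro acc ub; simp [Ex]
  | cons p S ih =>
    intro acc ub
    obtain ⟨i, v⟩ := p
    rw [List.foldl_cons, Ex]
    have hlo : (if i + 1 > k then i + 1 else k) = max (i + 1) k := by
      split_ifs <;> omega
    simp only [hlo]
    by_cases hle : max (i + 1) k ≤ ub
    · rw [if_pos hle, ih, List.append_assoc]
      have hcnt : ub - max (i + 1) k + 1 = ub + 1 - max (i + 1) k := by ring
      rw [hcnt]
    · rw [if_neg hle, ih]
      have h0 : (ub + 1 - max (i + 1) k).toNat = 0 := by
        rcases le_total (i + 1) k with hik | hik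
        · rw [max_eq_right hik] at hle ⊢
          omega
        · rw [max_eq_left hik] at hle ⊢
          omega
      rw [h0, List.replicate_zero, List.nil_append]

-- the slice max in A's summary in terms of take/foldl
theorem slice_max_eq (x : Int) (xs : List Int) (k : Int) (hk1 : 1 ≤ k)
    (hk2 : k ≤ ((x :: xs).length : Int)) :
    (PySem.List.max? (PySem.List.slice (x :: xs) none (some k)) (fun y => y)).getD 0 =
      (xs.take (k.toNat - 1)).foldl max x := by
  have hk : (k.toNat : Int) = k := Int.toNat_of_nonneg (by omega)
  have htk : (x :: xs).take k.toNat = x :: xs.take (k.toNat - 1) := by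
    conv_lhs => rw [show k.toNat = (k.toNat - 1) + 1 by omega]
    rw [List.take_succ_cons]
  rw [← hk, PySem.List.slice_to_natCast, htk, PySem.List.max?_id_cons]
  rfl

-- the seed max over indices range(k) in terms of take/foldl
theorem base_eq (x : Int) (xs : List Int) (k : Int) (hk1 : 1 ≤ k)
    (hk2 : k ≤ (((x :: xs).length : Nat) : Int)) :
    (PySem.List.max? ((PySem.List.pyRange 0 k 1).map
        (fun i => PySem.List.pyGetD (x :: xs) i 0)) (fun y => y)).getD 0 =
      (xs.take (k.toNat - 1)).foldl max x := by
  have hmap : (PySem.List.pyRange 0 k 1).map (fun i => PySem.List.pyGetD (x :: xs) i 0) =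
      (x :: xs).take k.toNat := by
    rw [PySem.List.pyRange_one, List.map_map]
    apply List.ext_getElem
    · simp only [List.length_map, List.length_range, List.length_take, List.length_cons]
      have hk2' : k ≤ (xs.length : Int) + 1 := by simpa using hk2
      omega
    · intro i h1 h2
      simp only [List.getElem_map, List.getElem_range, List.getElem_take, Function.comp]
      rw [zero_add, PySem.List.pyGetD_natCast]
      rw [List.length_map, List.length_range] at h1
      have hk2' : k ≤ (xs.length : Int) + 1 := by simpa using hk2
      have hi : i < (x :: xs).length := by
        rw [List.length_cons]
        omega
      rw [List.getD_eq_getElem?_getD, List.getElem?_eq_getElem hi, Option.getD_some]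
  have htk : (x :: xs).take k.toNat = x :: xs.take (k.toNat - 1) := by
    conv_lhs => rw [show k.toNat = (k.toNat - 1) + 1 by omega]
    rw [List.take_succ_cons]
  rw [hmap, htk, PySem.List.max?_id_cons]
  rfl

-- pmQ at length k + t equals the fold of rest.take t starting from c
theorem pmQ_split (x : Int) (xs : List Int) (k : Int) (t : Nat) (hk1 : 1 ≤ k)
    (hk2 : k ≤ ((x :: xs).length : Int)) :
    pmQ (x :: xs) (k + (t : Int)) =
      (((x :: xs).drop k.toNat).take t).foldl max ((xs.take (k.toNat - 1)).foldl max x) := by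
  have hkt : (k + (t : Int)).toNat = (k.toNat - 1 + t) + 1 := by omega
  have hdrop : (x :: xs).drop k.toNat = xs.drop (k.toNat - 1) := by
    conv_lhs => rw [show k.toNat = (k.toNat - 1) + 1 by omega]
    rw [List.drop_succ_cons]
  rw [pmQ, hkt, List.take_succ_cons, List.take_add, hdrop]
  simp only []
  rw [List.foldl_append]

-- pms as a map of prefix folds
theorem pms_eq_map (c : Int) (ws : List Int) :
    pms c ws = (List.range (ws.length + 1)).map (fun t => (ws.take t).foldl max c) := by
  induction ws generalizing c with
  | nil => simp [pms]
  | cons w ws ih =>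
    rw [pms, ih (max c w), List.length_cons]
    conv_rhs => rw [List.range_succ_eq_map, List.map_cons, List.map_map]
    congr 1

-- B-side summary: solution_alt = descL = (pms c rest).reverse
theorem B_eq_pms_rev (fw : List Int) (k : Int) (hk1 : 1 ≤ k) (hk2 : k ≤ (fw.length : Int)) :
    solution_alt fw k =
      (pms ((PySem.List.max? (PySem.List.slice fw none (some k)) (fun x => x)).getD 0)
        (fw.drop k.toNat)).reverse := by
  obtain ⟨x, xs, rfl⟩ : ∃ x xs, fw = x :: xs := by
    cases fw with
    | nil => simp at hk2; omega
    | cons a l => exact ⟨a, l, rfl⟩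
  have hk : (k.toNat : Int) = k := Int.toNat_of_nonneg (by omega)
  have hk2' : k ≤ (xs.length : Int) + 1 := by simpa using hk2
  rw [slice_max_eq x xs k hk1 hk2]
  set c := (xs.take (k.toNat - 1)).foldl max x with hcdef
  set rest := (x :: xs).drop k.toNat with hrest
  set r := rest.length with hr
  have hrlen : r = (x :: xs).length - k.toNat := by rw [hr, hrest, List.length_drop]
  have hkl : k.toNat ≤ (x :: xs).length := by
    rw [List.length_cons]
    omega
  have hrec := rec_fold_eq (x :: xs) rest k (by omega) hrest [] (k - 1) c
  simp only [List.nil_append] at hrec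
  have hcovk : ∀ L : Int, k - 1 < L → L ≤ k → pmQ (x :: xs) L = c := by
    intro L h1 h2
    have hL : L = k := by omega
    have h0 := pmQ_split x xs k 0 hk1 hk2
    rw [hL]
    simpa [← hcdef] using h0
  have hchain : chain (x :: xs) (((k - 1, c) :: recsM rest k c).reverse)
      ((x :: xs).length : Int) (k - 1) := by
    rw [List.reverse_cons]
    have h1 := recsM_chain (x :: xs) rest k c (k - 1) (by omega) (by omega) hrest hcovk
    have hlen : k + ((rest.length : Nat) : Int) = ((x :: xs).length : Int) := by
      rw [← hr]
      push_cast [hrlen]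
      omega
    rwa [hlen] at h1
  rw [solution_alt]
  simp only [base_eq x xs k hk1 hk2, ← hcdef]
  rw [hrec]
  rw [exp_fold_eq k (((k - 1, c) :: recsM rest k c).reverse) [] (((x :: xs).length : Nat) : Int),
    List.nil_append]
  rw [Ex_correct (x :: xs) k (((k - 1, c) :: recsM rest k c).reverse)
      (((x :: xs).length : Nat) : Int) (k - 1) (by omega) hchain]
  -- descL = (pms c rest).reverse
  rw [pms_eq_map c rest, ← hr]
  rw [← List.map_reverse]
  rw [List.range_eq_range', List.reverse_range']
  rw [List.map_map]
  rw [descL, show (((x :: xs).length : Int) + 1 - k).toNat = r + 1 by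
    rw [List.length_cons] at hrlen ⊢
    push_cast
    omega]
  apply List.map_congr_left
  intro j hj
  rw [List.mem_range] at hj
  simp only [Function.comp]
  have harg : ((x :: xs).length : Int) - (j : Int) = k + ((r - j : Nat) : Int) := by
    rw [List.length_cons] at hrlen ⊢
    push_cast
    omega
  rw [harg, pmQ_split x xs k (r - j) hk1 hk2]
  rw [← hcdef, ← hrest]
  congr 2
  omega

theorem main_eq (fw : List Int) (k : Int) (hk1 : 1 ≤ k) (hk2 : k ≤ (fw.length : Int)) :
    solution fw k = solution_alt fw k := by
  rw [A_eq_pms_rev fw k hk1 hk2, B_eq_pms_rev fw k hk1 hk2]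

-- ===== VERDICT (by name: the statement is the Claim_ definition above) =====
theorem solution_spec : Claim_equal_solution := by
  intro fw k _ hpre
  exact main_eq fw k hpre.1 hpre.2
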